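-- pv_equiv track=rewrite | github.com/rkdalsdn94/algoalgo | solved_ac/Silver_4/The_Chosen_Sub_Matrix_7800.py | find_best_submatrix
-- ===== SOURCE A (Python) =====
-- def find_best_submatrix(n, m, matrix):
--     candidates = []
--
--     # 모든 가능한 M x M 부분 행렬을 순회
--     for i in range(n - m + 1):
--         for j in range(n - m + 1):
--             # 부분 행렬 추출
--             submatrix = [row[j:j + m] for row in matrix[i:i + m]]
--
--             # 서로 다른 원소 찾기
--             unique_elements = set()
--             for row in submatrix:
--                 for element in row:
--                     unique_elements.add(element)
--
--             # 서로 다른 원소의 개수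
--             distinct_count = len(unique_elements)
--
--             # 서로 다른 원소들을 내림차순으로 정렬
--             sorted_elements = sorted(unique_elements, reverse=True)
--
--             # 정렬 키 생성
--             sort_key = (distinct_count, [-x for x in sorted_elements], i, j)
--             candidates.append((sort_key, i + 1, j + 1)) # 1-based 인덱스로 저장
--
--     # 우선순위에 따라 정렬
--     candidates.sort()
--
--     # 가장 우선순위가 높은 부분 행렬의 위치 반환
--     return candidates[0][1], candidates[0][2]
-- ===== SOURCE B (Python) =====
-- def find_best_submatrix(n, m, matrix):
--     size = n - m + 1
--     # staged (radix-style) selection: filter by the first key component, then the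
--     # second, then take the first survivor -- no composite keys, no global sort
--     windows = [((i, j), {x for row in matrix[i:i + m] for x in row[j:j + m]})
--                for i in range(size) for j in range(size)]
--     best_count = min(len(s) for _, s in windows)
--     pool = [(p, sorted(-x for x in s)) for p, s in windows if len(s) == best_count]
--     best_list = min(l for _, l in pool)
--     for (i, j), l in pool:
--         if l == best_list:
--             return i + 1, j + 1
-- ===== Notes on version B (the rewrite author's own statement) =====
-- stated objective: alternative
-- what changed: B replaces A's composite-key candidate list plus global sort with a staged (radix-style) selection: one pass computes each window's distinct-element set, a min pass finds the smallest distinct count, the survivors are filtered and only their negated sorted element lists are built, a second min pass finds the smallest such list, and the first surviving window with that list is returned - no key tuples and no sorting of candidates anywhere.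
import Mathlib
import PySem

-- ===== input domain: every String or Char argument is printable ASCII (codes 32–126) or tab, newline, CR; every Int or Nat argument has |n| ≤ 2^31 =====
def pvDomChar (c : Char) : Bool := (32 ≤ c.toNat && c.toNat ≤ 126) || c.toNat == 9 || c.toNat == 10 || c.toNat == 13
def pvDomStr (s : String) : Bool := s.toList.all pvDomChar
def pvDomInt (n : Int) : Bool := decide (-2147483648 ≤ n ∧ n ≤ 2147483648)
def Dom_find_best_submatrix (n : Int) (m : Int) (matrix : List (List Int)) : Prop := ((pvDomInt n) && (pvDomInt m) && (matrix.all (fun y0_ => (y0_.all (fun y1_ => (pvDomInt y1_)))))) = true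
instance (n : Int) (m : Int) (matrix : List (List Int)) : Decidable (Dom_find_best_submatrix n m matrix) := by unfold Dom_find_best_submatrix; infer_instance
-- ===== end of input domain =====

-- B replaces A's composite-key candidate list + global sort with a staged (radix-style) selection:
-- min distinct count, filter, min negated sorted element list, first surviving window
-- (objective: alternative — no key tuples and no candidate sorting anywhere).


-- A's sort key (distinct_count, [-x ...], i, j) and candidate ((key), i+1, j+1) as plain tuples
abbrev K4 : Type := Int × List Int × Int × Int
abbrev CandT : Type := K4 × Int × Int

-- ===== PORT A =====
-- Python's `<` on 4-tuples (int, list[int], int, int), ported by hand: lexicographic, exact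
-- (Lean's `<` on List Int is Python's list comparison; Mathlib's product order is not lexicographic).
def k4Lt (a b : K4) : Bool :=
  decide (a.1 < b.1) || (a.1 == b.1 &&
    (decide (a.2.1 < b.2.1) || (a.2.1 == b.2.1 &&
      (decide (a.2.2.1 < b.2.2.1) || (a.2.2.1 == b.2.2.1 && decide (a.2.2.2 < b.2.2.2))))))

-- Python's `<` on A's candidate triples ((key), i+1, j+1), ported by hand: lexicographic, exact
def candLt (a b : CandT) : Bool :=
  k4Lt a.1 b.1 || (a.1 == b.1 &&
    (decide (a.2.1 < b.2.1) || (a.2.1 == b.2.1 && decide (a.2.2 < b.2.2))))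

def find_best_submatrix (n : Int) (m : Int) (matrix : List (List Int)) : Int × Int :=
  let candidates : List CandT :=   -- candidates.append(...): built back-to-front, restored by the final reverse (same list)
    ((PySem.List.pyRange 0 (n - m + 1)).foldl (fun acc i =>
      (PySem.List.pyRange 0 (n - m + 1)).foldl (fun acc j =>
        let submatrix := (PySem.List.slice matrix (some i) (some (i + m))).map
          (fun row => PySem.List.slice row (some j) (some (j + m)))
        let uniqueElements : PySem.Set Int :=
          submatrix.foldl (fun u row => row.foldl PySem.Set.add u) PySem.Set.empty
        let distinctCount : Int := (uniqueElements.length : Int)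
        let sortedElements := PySem.List.sorted uniqueElements (fun x => x) true
        let sortKey : K4 := (distinctCount, sortedElements.map (fun x => -x), i, j)
        ((sortKey, i + 1, j + 1) : CandT) :: acc) acc) []).reverse
  -- candidates.sort(): Lean's stable stdlib sort with Python's `<`, exact for Python's stable ascending list.sort()
  let sortedC := candidates.mergeSort (fun a b => !(candLt b a))
  match PySem.List.pyGet? sortedC 0 with    -- candidates[0]: IndexError (none) iff candidates = []
  | some c => (c.2.1, c.2.2)
  | none => (0, 0)

-- ===== PORT B =====
def find_best_submatrix_alt (n : Int) (m : Int) (matrix : List (List Int)) : Int × Int :=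
  let size := n - m + 1
  -- windows = [((i, j), {x for row in matrix[i:i+m] for x in row[j:j+m]}) ...]
  let windows : List ((Int × Int) × PySem.Set Int) :=
    (PySem.List.pyRange 0 size).flatMap (fun i =>
      (PySem.List.pyRange 0 size).map (fun j =>
        ((i, j), PySem.Set.ofList ((PySem.List.slice matrix (some i) (some (i + m))).flatMap
          (fun row => PySem.List.slice row (some j) (some (j + m)))))))
  -- best_count = min(len(s) for _, s in windows): ValueError (none) iff there is no window
  match PySem.List.min? (windows.map (fun w => (w.2.length : Int))) (fun c => c) with
  | none => (0, 0)
  | some bestCount =>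
    -- pool = [(p, sorted(-x for x in s)) for p, s in windows if len(s) == best_count]
    let pool := (windows.filter (fun w => (w.2.length : Int) == bestCount)).map
      (fun w => (w.1, PySem.List.sorted (w.2.map (fun x => -x)) (fun x => x) false))
    match PySem.List.min? (pool.map (fun w => w.2)) (fun l => l) with
    | none => (0, 0)      -- unreachable: pool is nonempty whenever windows is
    | some bestList =>
      -- for (i, j), l in pool: if l == best_list: return i + 1, j + 1
      match pool.find? (fun w => w.2 == bestList) with
      | some w => (w.1.1 + 1, w.1.2 + 1)
      | none => (0, 0)    -- unreachable: best_list is some pool entry's list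
-- ===== PRECONDITION & SPEC =====
-- A raises IndexError (candidates[0] on an empty list) exactly when there is no window, i.e. n - m + 1 < 1;
-- B's min() raises ValueError on the same inputs.
def Pre_find_best_submatrix (n : Int) (m : Int) (matrix : List (List Int)) : Prop := m ≤ n
instance (n : Int) (m : Int) (matrix : List (List Int)) : Decidable (Pre_find_best_submatrix n m matrix) := by unfold Pre_find_best_submatrix; infer_instance
def pvWitness_find_best_submatrix : Int × Int × List (List Int) := (2, 1, [[1, 2], [3, 4]])
def Spec_find_best_submatrix (n : Int) (m : Int) (matrix : List (List Int)) (out : Int × Int) : Prop := out = find_best_submatrix_alt n m matrix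
instance (n : Int) (m : Int) (matrix : List (List Int)) (out : Int × Int) : Decidable (Spec_find_best_submatrix n m matrix out) := by unfold Spec_find_best_submatrix; infer_instance

-- ===== CLAIM (what is proved, stated in full; the proofs are below) =====
def Claim_equal_find_best_submatrix : Prop := ∀ (n : Int) (m : Int) (matrix : List (List Int)), Dom_find_best_submatrix n m matrix → Pre_find_best_submatrix n m matrix → Spec_find_best_submatrix n m matrix (find_best_submatrix n m matrix)

-- ===== LEMMAS AND PROOFS =====

-- lexicographic encodings of the keys/candidates (proof-side only)
abbrev KL : Type := Lex (Int × Lex (List Int × Lex (Int × Int)))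
abbrev CL : Type := Lex (KL × Lex (Int × Int))

def toKL (k : K4) : KL := toLex (k.1, toLex (k.2.1, toLex (k.2.2.1, k.2.2.2)))
def encC (c : CandT) : CL := toLex (toKL c.1, toLex (c.2.1, c.2.2))

lemma toKL_inj {a b : K4} (h : toKL a = toKL b) : a = b := by
  simp only [toKL, toLex_inj, Prod.ext_iff] at h
  obtain ⟨h1, h2, h3, h4⟩ := h
  exact Prod.ext h1 (Prod.ext h2 (Prod.ext h3 h4))

lemma k4Lt_iff (a b : K4) : k4Lt a b = true ↔ toKL a < toKL b := by
  simp only [k4Lt, toKL, Prod.Lex.toLex_lt_toLex, Bool.or_eq_true, Bool.and_eq_true,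
    decide_eq_true_eq, beq_iff_eq]

lemma candLt_iff (a b : CandT) : candLt a b = true ↔ encC a < encC b := by
  simp only [candLt, encC, Prod.Lex.toLex_lt_toLex, Bool.or_eq_true, Bool.and_eq_true,
    decide_eq_true_eq, beq_iff_eq, k4Lt_iff]
  constructor
  · rintro (h | ⟨he, h⟩)
    · exact Or.inl h
    · exact Or.inr ⟨congrArg toKL he, h⟩
  · rintro (h | ⟨he, h⟩)
    · exact Or.inl h
    · exact Or.inr ⟨toKL_inj he, h⟩

lemma candLe_iff (a b : CandT) : (!(candLt b a)) = true ↔ encC a ≤ encC b := by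
  constructor
  · intro hb
    by_contra hlt
    rw [not_le] at hlt
    rw [(candLt_iff b a).mpr hlt] at hb
    simp at hb
  · intro hle
    by_contra hb
    rw [Bool.not_eq_true, Bool.not_eq_false'] at hb
    exact absurd ((candLt_iff b a).mp hb) (not_lt.mpr hle)

-- the row-major list of window positions both programs enumerate
def pairsL (n m : Int) : List (Int × Int) :=
  (PySem.List.pyRange 0 (n - m + 1)).flatMap (fun i =>
    (PySem.List.pyRange 0 (n - m + 1)).map (fun j => (i, j)))

-- the distinct-element set of window p, its count and its negated ascending sort (proof-side names)
def wset (m : Int) (matrix : List (List Int)) (p : Int × Int) : PySem.Set Int :=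
  PySem.Set.ofList ((PySem.List.slice matrix (some p.1) (some (p.1 + m))).flatMap
    (fun row => PySem.List.slice row (some p.2) (some (p.2 + m))))

def cnt (m : Int) (matrix : List (List Int)) (p : Int × Int) : Int :=
  ((wset m matrix p).length : Int)

def lst (m : Int) (matrix : List (List Int)) (p : Int × Int) : List Int :=
  PySem.List.sorted ((wset m matrix p).map (fun x => -x)) (fun x => x) false

-- the key A computes for window (i, j), and the candidate triple built from it
def aKey (m : Int) (matrix : List (List Int)) (p : Int × Int) : K4 :=
  let submatrix := (PySem.List.slice matrix (some p.1) (some (p.1 + m))).map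
    (fun row => PySem.List.slice row (some p.2) (some (p.2 + m)))
  let u : PySem.Set Int := submatrix.foldl (fun u row => row.foldl PySem.Set.add u) PySem.Set.empty
  ((u.length : Int), (PySem.List.sorted u (fun x => x) true).map (fun x => -x), p.1, p.2)

def fCand (m : Int) (matrix : List (List Int)) (p : Int × Int) : CandT :=
  (aKey m matrix p, p.1 + 1, p.2 + 1)

-- the double "add every element" loop is Set.ofList of the flattened rows
lemma set_foldl_flatten (rows : List (List Int)) (u : PySem.Set Int) :
    rows.foldl (fun u row => row.foldl PySem.Set.add u) u = rows.flatten.foldl PySem.Set.add u := by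
  induction rows generalizing u with
  | nil => rfl
  | cons r rs ih => simp [List.foldl_append, ih]

-- negating a descending sort of a duplicate-free list is the ascending sort of the negations
lemma map_neg_sorted_rev (E : List Int) (h : E.Nodup) :
    (PySem.List.sorted E (fun x => x) true).map (fun x => -x)
      = PySem.List.sorted (E.map (fun x => -x)) (fun x => x) false := by
  refine (PySem.List.sorted_eq_of_perm_of_pairwise_lt _ _ _ ((PySem.List.sorted_perm E _ true).map _) ?_).symm
  rw [List.pairwise_map]
  have hge := PySem.List.sorted_pairwise_rev E (fun x => x)
  have hnd : (PySem.List.sorted E (fun x => x) true).Nodup :=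
    ((PySem.List.sorted_perm E _ true).nodup_iff).mpr h
  exact (hge.and hnd).imp (fun hab => by omega)

-- A's per-window key in terms of the staged components
lemma aKey_eq (m : Int) (matrix : List (List Int)) (p : Int × Int) :
    aKey m matrix p = (cnt m matrix p, lst m matrix p, p.1, p.2) := by
  simp only [aKey, cnt, lst, wset, PySem.Set.empty]
  have hflat : ((PySem.List.slice matrix (some p.1) (some (p.1 + m))).map
      (fun row => PySem.List.slice row (some p.2) (some (p.2 + m)))).flatten
      = (PySem.List.slice matrix (some p.1) (some (p.1 + m))).flatMap
          (fun row => PySem.List.slice row (some p.2) (some (p.2 + m))) := by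
    simp [List.flatMap_def]
  rw [set_foldl_flatten, hflat, ← PySem.Set.ofList_eq_foldl]
  have hN := PySem.Set.nodup_ofList ((PySem.List.slice matrix (some p.1) (some (p.1 + m))).flatMap
      (fun row => PySem.List.slice row (some p.2) (some (p.2 + m))))
  rw [map_neg_sorted_rev _ hN]

-- a cons-accumulating loop builds the reversed map
lemma foldl_cons_rev {α β : Type} (g : α → β) (l : List α) (acc : List β) :
    l.foldl (fun acc x => g x :: acc) acc = (l.map g).reverse ++ acc := by
  induction l generalizing acc with
  | nil => rfl
  | cons x xs ih => simp [ih]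

-- an outer loop prepending reversed blocks builds the reversed flatMap
lemma foldl_revblock {α β : Type} (B : α → List β) (l : List α) (acc : List β) :
    l.foldl (fun acc x => (B x).reverse ++ acc) acc = (l.flatMap B).reverse ++ acc := by
  induction l generalizing acc with
  | nil => rfl
  | cons x xs ih => simp [ih]

-- A's candidate list is the map of fCand over the row-major pair list
lemma candidates_eq (n m : Int) (matrix : List (List Int)) :
    ((PySem.List.pyRange 0 (n - m + 1)).foldl (fun acc i =>
      (PySem.List.pyRange 0 (n - m + 1)).foldl (fun acc j =>
        let submatrix := (PySem.List.slice matrix (some i) (some (i + m))).map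
          (fun row => PySem.List.slice row (some j) (some (j + m)))
        let uniqueElements : PySem.Set Int :=
          submatrix.foldl (fun u row => row.foldl PySem.Set.add u) PySem.Set.empty
        let distinctCount : Int := (uniqueElements.length : Int)
        let sortedElements := PySem.List.sorted uniqueElements (fun x => x) true
        let sortKey : K4 := (distinctCount, sortedElements.map (fun x => -x), i, j)
        ((sortKey, i + 1, j + 1) : CandT) :: acc) acc) ([] : List CandT)).reverse
    = (pairsL n m).map (fCand m matrix) := by
  simp only [foldl_cons_rev]
  rw [foldl_revblock]
  simp only [List.append_nil, List.reverse_reverse, pairsL]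
  simp only [List.map_flatMap, List.map_map, Function.comp_def]
  simp only [fCand, aKey]

-- aKey determines the window: its last two components are the pair itself
lemma aKey_inj (m : Int) (matrix : List (List Int)) {p q : Int × Int}
    (h : aKey m matrix p = aKey m matrix q) : p = q := by
  have := congrArg (fun k : K4 => (k.2.2.1, k.2.2.2)) h
  simpa [aKey] using this

-- candidate order reduces to key order (the key determines the pair components)
lemma encC_le_iff (m : Int) (matrix : List (List Int)) (p q : Int × Int) :
    encC (fCand m matrix p) ≤ encC (fCand m matrix q)
      ↔ toKL (aKey m matrix p) ≤ toKL (aKey m matrix q) := by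
  constructor
  · intro h
    rcases Prod.Lex.toLex_le_toLex.mp h with hlt | ⟨heq, _⟩
    · exact le_of_lt hlt
    · exact le_of_eq heq
  · intro h
    rcases lt_or_eq_of_le h with hlt | heq
    · exact Prod.Lex.toLex_le_toLex.mpr (Or.inl hlt)
    · have : p = q := aKey_inj m matrix (toKL_inj heq)
      subst this
      exact le_refl _

-- unfolding the lexicographic key order into its staged components
lemma toKL_le_iff (m : Int) (matrix : List (List Int)) (p q : Int × Int) :
    toKL (aKey m matrix p) ≤ toKL (aKey m matrix q)
      ↔ (cnt m matrix p < cnt m matrix q ∨ (cnt m matrix p = cnt m matrix q ∧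
          (lst m matrix p < lst m matrix q ∨ (lst m matrix p = lst m matrix q ∧
            (p.1 < q.1 ∨ (p.1 = q.1 ∧ p.2 ≤ q.2)))))) := by
  rw [aKey_eq, aKey_eq]
  simp only [toKL, Prod.Lex.toLex_le_toLex]

lemma cnt_le_of_le {m : Int} {matrix : List (List Int)} {p q : Int × Int}
    (h : toKL (aKey m matrix p) ≤ toKL (aKey m matrix q)) : cnt m matrix p ≤ cnt m matrix q := by
  rcases (toKL_le_iff m matrix p q).mp h with h1 | ⟨h1, _⟩
  · exact le_of_lt h1
  · exact le_of_eq h1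

lemma lst_lt_or_eq_of_le {m : Int} {matrix : List (List Int)} {p q : Int × Int}
    (hc : cnt m matrix p = cnt m matrix q)
    (h : toKL (aKey m matrix p) ≤ toKL (aKey m matrix q)) :
    lst m matrix p < lst m matrix q ∨ lst m matrix p = lst m matrix q := by
  rcases (toKL_le_iff m matrix p q).mp h with h1 | ⟨_, h2 | ⟨h2, _⟩⟩
  · exact absurd h1 (by omega)
  · exact Or.inl h2
  · exact Or.inr h2

lemma pair_le_of_le {m : Int} {matrix : List (List Int)} {p q : Int × Int}
    (hc : cnt m matrix p = cnt m matrix q) (hl : lst m matrix p = lst m matrix q)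
    (h : toKL (aKey m matrix p) ≤ toKL (aKey m matrix q)) :
    p.1 < q.1 ∨ (p.1 = q.1 ∧ p.2 ≤ q.2) := by
  rcases (toKL_le_iff m matrix p q).mp h with h1 | ⟨_, h2 | ⟨_, h3⟩⟩
  · exact absurd h1 (by omega)
  · exact absurd h2 (by rw [hl]; exact lt_irrefl _)
  · exact h3

-- the row-major pair list is strictly increasing in the (i, j) lexicographic order
lemma pairwise_flat_pairs (l inner : List Int)
    (hl : l.Pairwise (· < ·)) (hin : inner.Pairwise (· < ·)) :
    (l.flatMap (fun i => inner.map (fun j => (i, j)))).Pairwise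
      (fun p q : Int × Int => p.1 < q.1 ∨ (p.1 = q.1 ∧ p.2 < q.2)) := by
  induction l with
  | nil => simp
  | cons a t ih =>
    rw [List.pairwise_cons] at hl
    rw [List.flatMap_cons, List.pairwise_append]
    refine ⟨?_, ih hl.2, ?_⟩
    · rw [List.pairwise_map]
      exact hin.imp (fun h => Or.inr ⟨rfl, h⟩)
    · intro x hx y hy
      obtain ⟨j, _, rfl⟩ := List.mem_map.mp hx
      obtain ⟨b, hb, hy'⟩ := List.mem_flatMap.mp hy
      obtain ⟨j', _, rfl⟩ := List.mem_map.mp hy'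
      exact Or.inl (hl.1 b hb)

lemma pairwise_pairsL (n m : Int) :
    (pairsL n m).Pairwise (fun p q : Int × Int => p.1 < q.1 ∨ (p.1 = q.1 ∧ p.2 < q.2)) :=
  pairwise_flat_pairs _ _ (PySem.List.pairwise_lt_pyRange_one 0 (n - m + 1))
    (PySem.List.pairwise_lt_pyRange_one 0 (n - m + 1))

-- in a Pairwise-R list, find?'s hit is the sought element or R-below any other hit
lemma find?_pairwise_eq {α : Type} {R : α → α → Prop} {pred : α → Bool} {l : List α} {w x : α}
    (hpw : l.Pairwise R) (hf : l.find? pred = some w) (hx : x ∈ l) (hpx : pred x = true) :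
    w = x ∨ R w x := by
  induction l with
  | nil => cases hf
  | cons a t ih =>
    rw [List.pairwise_cons] at hpw
    by_cases ha : pred a = true
    · rw [List.find?_cons_of_pos ha] at hf
      cases hf
      rcases List.mem_cons.mp hx with rfl | hxt
      · exact Or.inl rfl
      · exact Or.inr (hpw.1 x hxt)
    · rw [List.find?_cons_of_neg (by simpa using ha)] at hf
      rcases List.mem_cons.mp hx with rfl | hxt
      · exact absurd hpx ha
      · exact ih hpw.2 hf hxt

-- Core Lean's `<` on List Int (the instance the ports elaborate with) versus Mathlib's
-- lexicographic linear order on lists: the relations coincide, giving the order facts below.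

lemma listI_lt_iff (a b : List Int) : a < b ↔ List.Lex (· < ·) a b := List.lt_iff_lex_lt a b

lemma listI_lt_irrefl (a : List Int) : ¬ a < a := by
  rw [listI_lt_iff]
  exact lt_irrefl (α := List Int) a

lemma listI_lt_trans {a b c : List Int} (h1 : a < b) (h2 : b < c) : a < c := by
  rw [listI_lt_iff] at *
  exact lt_trans (α := List Int) h1 h2

lemma listI_lt_trich (a b : List Int) : a < b ∨ a = b ∨ b < a := by
  rw [listI_lt_iff a b, listI_lt_iff b a]
  exact lt_trichotomy (α := List Int) a b

lemma minGo {α : Type} (key : α → List Int) (xs : List α) : ∀ (acc : Option α) (mm : α),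
    xs.foldl (fun acc x => match acc with
      | none => some x
      | some m => if key x < key m then some x else some m) acc = some mm →
    (acc = some mm ∨ mm ∈ xs) ∧ (∀ y ∈ xs, ¬ key y < key mm) ∧
      (∀ a, acc = some a → ¬ key a < key mm) := by
  induction xs with
  | nil =>
    intro acc mm h
    simp only [List.foldl_nil] at h
    exact ⟨Or.inl h, by simp, fun a ha => by
      rw [h] at ha
      cases ha
      exact listI_lt_irrefl _⟩
  | cons x t ih =>
    intro acc mm h
    rw [List.foldl_cons] at h
    obtain ⟨h1, h2, h3⟩ := ih _ mm h
    have hx : ¬ key x < key mm := by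
      cases acc with
      | none => exact h3 x rfl
      | some a =>
        by_cases hxa : key x < key a
        · exact h3 x (by simp [hxa])
        · have ha := h3 a (by simp [hxa])
          intro hxm
          rcases listI_lt_trich (key x) (key a) with hc | hc | hc
          · exact hxa hc
          · exact ha (hc ▸ hxm)
          · exact ha (listI_lt_trans hc hxm)
    refine ⟨?_, ?_, ?_⟩
    · rcases h1 with h1 | h1
      · cases acc with
        | none =>
          simp only at h1
          cases h1
          exact Or.inr List.mem_cons_self
        | some a =>
          by_cases hxa : key x < key a
          · simp only [hxa, if_true] at h1
            cases h1
            exact Or.inr List.mem_cons_self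
          · simp only [hxa, if_false] at h1
            exact Or.inl h1
      · exact Or.inr (List.mem_cons_of_mem _ h1)
    · intro y hy
      rcases List.mem_cons.mp hy with rfl | hyt
      · exact hx
      · exact h2 y hyt
    · intro a ha
      subst ha
      by_cases hxa : key x < key a
      · intro ham
        exact (h3 x (by simp [hxa])) (listI_lt_trans hxa ham)
      · exact h3 a (by simp [hxa])

lemma minListI_spec {α : Type} {key : α → List Int} {xs : List α} {mm : α}
    (h : PySem.List.min? xs key = some mm) :
    mm ∈ xs ∧ ∀ y ∈ xs, ¬ key y < key mm := by
  unfold PySem.List.min? at h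
  obtain ⟨h1, h2, _⟩ := minGo key xs none mm h
  refine ⟨?_, h2⟩
  rcases h1 with h1 | h1
  · cases h1
  · exact h1

lemma minListI_ne_none {α : Type} (key : α → List Int) (x : α) (t : List α) :
    PySem.List.min? (x :: t) key ≠ none := by
  unfold PySem.List.min?
  rw [List.foldl_cons]
  simp only
  generalize x = a
  induction t generalizing a with
  | nil => simp
  | cons y t ih =>
    rw [List.foldl_cons]
    by_cases hy : key y < key a <;> simp only [hy, if_true, if_false] <;> apply ih

-- B returns the window with the lexicographically minimal key
lemma alt_eq_of_isBest (n m : Int) (matrix : List (List Int)) (p : Int × Int)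
    (hmem : p ∈ pairsL n m)
    (hmin : ∀ q ∈ pairsL n m, toKL (aKey m matrix p) ≤ toKL (aKey m matrix q)) :
    find_best_submatrix_alt n m matrix = (p.1 + 1, p.2 + 1) := by
  unfold find_best_submatrix_alt
  simp only []
  have hwin : (PySem.List.pyRange 0 (n - m + 1)).flatMap (fun i =>
      (PySem.List.pyRange 0 (n - m + 1)).map (fun j =>
        ((i, j), PySem.Set.ofList ((PySem.List.slice matrix (some i) (some (i + m))).flatMap
          (fun row => PySem.List.slice row (some j) (some (j + m)))))))
      = (pairsL n m).map (fun q => (q, wset m matrix q)) := by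
    unfold pairsL wset
    simp [List.map_flatMap, List.map_map, Function.comp_def]
  rw [hwin]
  have hcounts : ((pairsL n m).map (fun q => (q, wset m matrix q))).map (fun w => ((w.2.length : Int)))
      = (pairsL n m).map (fun q => cnt m matrix q) := by
    simp [List.map_map, Function.comp_def, cnt]
  rw [hcounts]
  rcases hmin1 : PySem.List.min? ((pairsL n m).map (fun q => cnt m matrix q)) (fun c => c) with _ | c
  · rw [PySem.List.min?_eq_none_iff] at hmin1
    exact absurd (List.map_eq_nil_iff.mp hmin1) (List.ne_nil_of_mem hmem)
  · dsimp only
    have hcmem := PySem.List.min?_mem hmin1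
    obtain ⟨q0, hq0, hq0c⟩ := List.mem_map.mp hcmem
    have hcmin := PySem.List.min?_isMin hmin1
    have hcp : c = cnt m matrix p := by
      have h1 : c ≤ cnt m matrix p := hcmin _ (List.mem_map.mpr ⟨p, hmem, rfl⟩)
      have h2 : cnt m matrix p ≤ cnt m matrix q0 := cnt_le_of_le (hmin q0 hq0)
      omega
    have hpool : (((pairsL n m).map (fun q => (q, wset m matrix q))).filter
          (fun w => ((w.2.length : Int)) == c)).map
          (fun w => (w.1, PySem.List.sorted (w.2.map (fun x => -x)) (fun x => x) false))
        = ((pairsL n m).filter (fun q => cnt m matrix q == c)).map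
          (fun q => (q, lst m matrix q)) := by
      rw [List.filter_map]
      simp [List.map_map, Function.comp_def, cnt, lst]
    rw [hpool]
    set P := (pairsL n m).filter (fun q => cnt m matrix q == c) with hP
    have hpP : p ∈ P := by
      rw [hP, List.mem_filter]
      exact ⟨hmem, by simp [hcp]⟩
    have hPprop : ∀ q ∈ P, q ∈ pairsL n m ∧ cnt m matrix q = c := by
      intro q hq
      rw [hP, List.mem_filter] at hq
      exact ⟨hq.1, by simpa using hq.2⟩
    have hlists : (P.map (fun q => (q, lst m matrix q))).map (fun w => w.2)
        = P.map (fun q => lst m matrix q) := by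
      simp [List.map_map, Function.comp_def]
    rw [hlists]
    rcases hmin2 : PySem.List.min? (P.map (fun q => lst m matrix q)) (fun l => l) with _ | L
    · rcases hPl : P.map (fun q => lst m matrix q) with _ | ⟨a, t⟩
      · exact absurd (List.map_eq_nil_iff.mp hPl) (List.ne_nil_of_mem hpP)
      · rw [hPl] at hmin2
        exact absurd hmin2 (minListI_ne_none _ a t)
    · dsimp only
      obtain ⟨hLmem, hLmin⟩ := minListI_spec hmin2
      obtain ⟨q1, hq1, hq1L⟩ := List.mem_map.mp hLmem
      have hLp : L = lst m matrix p := by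
        have h1 : ¬ lst m matrix p < L := hLmin _ (List.mem_map.mpr ⟨p, hpP, rfl⟩)
        obtain ⟨hq1mem, hq1c⟩ := hPprop q1 hq1
        rcases lst_lt_or_eq_of_le (by omega) (hmin q1 hq1mem) with h2 | h2
        · exact absurd (hq1L ▸ h2) h1
        · rw [← hq1L, h2]
      rw [List.find?_map]
      simp only [Function.comp_def]
      have hppred : ((p, lst m matrix p).2 == L) = true := by
        simp [hLp]
      rcases hfind : P.find? (fun q => (q, lst m matrix q).2 == L) with _ | w
      · rw [List.find?_eq_none] at hfind
        exact absurd hppred (by simpa using hfind p hpP)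
      · simp only [Option.map_some]
        have hwP := List.mem_of_find?_eq_some hfind
        have hwL : lst m matrix w = L := by
          have := List.find?_some hfind
          simpa using this
        obtain ⟨hwmem, hwc⟩ := hPprop w hwP
        have hPpw : P.Pairwise (fun p q : Int × Int => p.1 < q.1 ∨ (p.1 = q.1 ∧ p.2 < q.2)) :=
          (pairwise_pairsL n m).filter _
        have hwp : w = p := by
          rcases find?_pairwise_eq hPpw hfind hpP hppred with h1 | h1
          · exact h1
          · have hle := pair_le_of_le (p := p) (q := w)
              (by obtain ⟨_, hc2⟩ := hPprop p hpP; omega) (by rw [hwL, hLp]) (hmin w hwmem)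
            exfalso
            rcases h1 with h2 | ⟨h2, h3⟩ <;> rcases hle with h4 | ⟨h4, h5⟩ <;> omega
        subst hwp
        rfl

-- A returns the window with the lexicographically minimal key
lemma a_eq_best (n m : Int) (matrix : List (List Int)) (hs : 0 < n - m + 1) :
    ∃ p, p ∈ pairsL n m ∧ (∀ q ∈ pairsL n m, toKL (aKey m matrix p) ≤ toKL (aKey m matrix q)) ∧
      find_best_submatrix n m matrix = (p.1 + 1, p.2 + 1) := by
  have hRne : (0 : Int) ∈ PySem.List.pyRange 0 (n - m + 1) := by
    rw [PySem.List.pyRange_one_cons hs]; exact List.mem_cons_self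
  have hmem00 : ((0 : Int), (0 : Int)) ∈ pairsL n m := by
    unfold pairsL
    exact List.mem_flatMap.mpr ⟨0, hRne, List.mem_map.mpr ⟨0, hRne, rfl⟩⟩
  have hpne : pairsL n m ≠ [] := List.ne_nil_of_mem hmem00
  unfold find_best_submatrix
  simp only []
  rw [candidates_eq n m matrix]
  have hperm := List.mergeSort_perm ((pairsL n m).map (fCand m matrix)) (fun a b => !(candLt b a))
  have hpw := List.pairwise_mergeSort (le := fun a b : CandT => !(candLt b a))
    (fun a b c hab hbc => (candLe_iff a c).mpr
      (le_trans ((candLe_iff a b).mp hab) ((candLe_iff b c).mp hbc)))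
    (fun a b => by
      simp only [Bool.or_eq_true]
      rcases le_total (encC a) (encC b) with hab | hba
      · exact Or.inl ((candLe_iff a b).mpr hab)
      · exact Or.inr ((candLe_iff b a).mpr hba))
    ((pairsL n m).map (fCand m matrix))
  rcases hsorted : ((pairsL n m).map (fCand m matrix)).mergeSort (fun a b => !(candLt b a)) with _ | ⟨h, t⟩
  · rw [hsorted] at hperm
    exact absurd (List.map_eq_nil_iff.mp hperm.symm.eq_nil) hpne
  rw [hsorted] at hperm hpw
  have hget : PySem.List.pyGet? (h :: t) 0 = some h := by
    simp [PySem.List.pyGet?, PySem.List.pyIdx?]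
  rw [hget]
  have hmemh : h ∈ (pairsL n m).map (fCand m matrix) := hperm.subset List.mem_cons_self
  obtain ⟨p, hpmem, hfp⟩ := List.mem_map.mp hmemh
  rw [List.pairwise_cons] at hpw
  refine ⟨p, hpmem, ?_, ?_⟩
  · intro q hq
    have hy : fCand m matrix q ∈ (pairsL n m).map (fCand m matrix) := List.mem_map.mpr ⟨q, hq, rfl⟩
    have hle : encC (fCand m matrix p) ≤ encC (fCand m matrix q) := by
      rw [hfp]
      rcases List.mem_cons.mp ((hperm.mem_iff).mpr hy) with h1 | h2
      · exact le_of_eq (congrArg encC h1.symm)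
      · exact (candLe_iff h _).mp (hpw.1 _ h2)
    exact (encC_le_iff m matrix p q).mp hle
  · rw [← hfp]
    rfl

-- ===== VERDICT (by name: the statement is the Claim_ definition above) =====
theorem find_best_submatrix_spec : Claim_equal_find_best_submatrix := by
  intro n m matrix _ hpre
  have hs : (0 : Int) < n - m + 1 := by unfold Pre_find_best_submatrix at hpre; omega
  obtain ⟨p, hpmem, hpmin, hA⟩ := a_eq_best n m matrix hs
  unfold Spec_find_best_submatrix
  rw [hA, alt_eq_of_isBest n m matrix p hpmem hpmin]
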